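-- pv_equiv track=rewrite | github.com/piegeek/AlgorithmsPractice | Practice/cses/mountainrange.py | dp
-- ===== SOURCE A (Python) =====
-- def dp(left, right, n, heights, cache):
--     # Leaf node
--     if right <= left:
--         return 1
--
--     # if right - left == 1:
--     #     return 1
--
--     all_smaller = True
--     for pointer in range(left+1, right+1):
--         if heights[pointer] >= heights[left]:
--             all_smaller = False
--             break
--
--     if all_smaller:
--         # if right == n - 1:
--         #     return right - left + 1
--         # else:
--         #     return right - left + 2
--         return right - left + 1
--
--     if (left, right) in cache:
--         return cache[(left, right)]
--
--     ret = 1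
--
--     ret = max(
--         dp(left + 1, right, n, heights, cache),
--         dp(left + 1, right - 1, n, heights, cache),
--         dp(left, right - 1, n, heights, cache)
--     )
--
--     cache[(left, right)] = ret
--     return ret
-- ===== SOURCE B (Python) =====
-- def dp(left, right, n, heights, cache):
--     # Bottom-up tabulation over interval widths; the all-smaller flag for (l, r)
--     # is maintained incrementally from (l, r-1), so no inner rescans.
--     # Note: unlike A, this does not mutate `cache`; the equivalence is about the return value.
--     if right <= left:
--         return 1
--     val = {}
--     sm = {}
--     for d in range(1, right - left + 1):
--         for l in range(left, right - d + 1):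
--             r = l + d
--             smaller = (d == 1 or sm[(l, r - 1)]) and heights[r] < heights[l]
--             sm[(l, r)] = smaller
--             if smaller:
--                 v = d + 1
--             elif (l, r) in cache:
--                 v = cache[(l, r)]
--             else:
--                 v = max(val.get((l + 1, r), 1),
--                         val.get((l + 1, r - 1), 1),
--                         val.get((l, r - 1), 1))
--             val[(l, r)] = v
--     return val[(left, right)]
-- ===== Notes on version B (the rewrite author's own statement) =====
-- stated objective: faster
-- what changed: Replaces A's top-down memoized 3-way recursion, which rescans heights[left+1..right] from scratch at every state, by an iterative bottom-up tabulation over interval widths whose all-smaller flag is maintained incrementally from the next-narrower interval, so the inner scan disappears.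
-- outside the precondition, e.g. on dp(0, 5, 6, [1, 2], {(0, 5): 7}): A returns 7, B raises IndexError
import Mathlib
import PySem

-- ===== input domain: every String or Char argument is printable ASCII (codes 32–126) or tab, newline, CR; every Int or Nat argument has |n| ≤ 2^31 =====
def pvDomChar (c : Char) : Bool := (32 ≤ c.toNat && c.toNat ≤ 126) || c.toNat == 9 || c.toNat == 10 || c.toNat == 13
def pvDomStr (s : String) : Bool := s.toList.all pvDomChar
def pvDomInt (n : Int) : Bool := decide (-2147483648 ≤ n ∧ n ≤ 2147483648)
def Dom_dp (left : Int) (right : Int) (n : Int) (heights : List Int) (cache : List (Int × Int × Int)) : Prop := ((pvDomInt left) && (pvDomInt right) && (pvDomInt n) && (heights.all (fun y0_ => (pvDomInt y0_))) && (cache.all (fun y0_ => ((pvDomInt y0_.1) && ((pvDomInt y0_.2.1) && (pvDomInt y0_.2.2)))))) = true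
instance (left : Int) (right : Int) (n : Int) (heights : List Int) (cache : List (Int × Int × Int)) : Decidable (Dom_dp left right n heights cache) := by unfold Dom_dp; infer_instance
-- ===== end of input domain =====

-- B replaces A's memoized 3-way recursion (with a fresh O(w) all-smaller scan per state)
-- by a bottom-up tabulation over interval widths whose all-smaller flag is maintained
-- incrementally, removing the inner scan (objective: faster). A mutates `cache` in place;
-- the equivalence proved here is about the RETURN value only (B does not mutate it).

-- ===== PORT A =====
-- first-match lookup of key (l, r) in the dict `cache` (assoc list (l, r, v))
def dpCacheGetA (cache : List (Int × Int × Int)) (l r : Int) : Option Int :=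
  match cache with
  | [] => none
  | (a, b, v) :: t => if a = l ∧ b = r then some v else dpCacheGetA t l r

-- A's `for pointer in range(left+1, right+1): if heights[pointer] >= heights[left]: break`
-- (out-of-range reads default to 0; Pre_dp keeps every read in range)
def dpAllSmallerA (heights : List Int) (hl : Int) : List Int → Bool
  | [] => true
  | p :: ps =>
      if hl ≤ (PySem.List.pyGet? heights p).getD 0 then false else dpAllSmallerA heights hl ps

-- A's recursion, threading the mutable cache as state; returns (value, cache after).
-- `fuel` only makes the recursion structural: every call keeps right - left < fuel,
-- so the 0 branch is never reached (dp passes (right-left).toNat + 1).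
def dpGoA (fuel : Nat) (n : Int) (heights : List Int) (left right : Int)
    (cache : List (Int × Int × Int)) : Int × List (Int × Int × Int) :=
  match fuel with
  | 0 => (1, cache)
  | fuel + 1 =>
    if right ≤ left then (1, cache)
    else if dpAllSmallerA heights ((PySem.List.pyGet? heights left).getD 0)
              (PySem.List.pyRange (left + 1) (right + 1) 1) then
      (right - left + 1, cache)
    else
      match dpCacheGetA cache left right with
      | some v => (v, cache)
      | none =>
          let p1 := dpGoA fuel n heights (left + 1) right cache
          let p2 := dpGoA fuel n heights (left + 1) (right - 1) p1.2
          let p3 := dpGoA fuel n heights left (right - 1) p2.2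
          let ret := max (max p1.1 p2.1) p3.1
          (ret, p3.2 ++ [(left, right, ret)])

def dp (left : Int) (right : Int) (n : Int) (heights : List Int) (cache : List (Int × Int × Int)) : Int :=
  (dpGoA ((right - left).toNat + 1) n heights left right cache).1

-- ===== PORT B =====
-- Source B's `(l, r) in cache` / `cache[(l, r)]` (first match in the assoc list)
def dpCacheFindB (cache : List (Int × Int × Int)) (key : Int × Int) : Option Int :=
  (cache.find? (fun e => e.1 == key.1 && e.2.1 == key.2)).map (fun e => e.2.2)

-- body of Source B's inner loop: fill cell (l, l+d) of the two tables
def dpCellB (heights : List Int) (cache : List (Int × Int × Int))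
    (st : PySem.Dict (Int × Int) Int × PySem.Dict (Int × Int) Bool) (d l : Int) :
    PySem.Dict (Int × Int) Int × PySem.Dict (Int × Int) Bool :=
  let r := l + d
  let smaller := (d == 1 || st.2.getD (l, r - 1) false)
      && decide ((PySem.List.pyGet? heights r).getD 0 < (PySem.List.pyGet? heights l).getD 0)
  let v := if smaller then d + 1
    else match dpCacheFindB cache (l, r) with
      | some w => w
      | none => max (max (st.1.getD (l + 1, r) 1) (st.1.getD (l + 1, r - 1) 1))
                    (st.1.getD (l, r - 1) 1)
  (st.1.insert (l, r) v, st.2.insert (l, r) smaller)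

def dp_alt (left : Int) (right : Int) (n : Int) (heights : List Int) (cache : List (Int × Int × Int)) : Int :=
  if right ≤ left then 1
  else
    let st := (PySem.List.pyRange 1 (right - left + 1) 1).foldl
      (fun st d => (PySem.List.pyRange left (right - d + 1) 1).foldl
        (fun st l => dpCellB heights cache st d l) st)
      (PySem.Dict.empty, PySem.Dict.empty)
    (st.1.get? (left, right)).getD 0

-- ===== PRECONDITION & SPEC =====
-- Pre_dp excludes inputs whose indices leave the list: there A raises IndexError, except
-- when a pre-seeded cache entry or an early break lets A's lazy scan return before touching
-- the out-of-range index — an artefact of A's scanning order that B's tabulation (which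
-- always reads heights[left..right]) does not reproduce.
def Pre_dp (left : Int) (right : Int) (n : Int) (heights : List Int) (cache : List (Int × Int × Int)) : Prop :=
  right ≤ left ∨ (-(heights.length : Int) ≤ left ∧ right < (heights.length : Int))
instance (left : Int) (right : Int) (n : Int) (heights : List Int) (cache : List (Int × Int × Int)) : Decidable (Pre_dp left right n heights cache) := by unfold Pre_dp; infer_instance

def pvWitness_dp : Int × Int × Int × List Int × (List (Int × Int × Int)) :=
  (0, 3, 4, [3, 1, 2, 1], [(1, 3, 5)])

def Spec_dp (left : Int) (right : Int) (n : Int) (heights : List Int) (cache : List (Int × Int × Int)) (out : Int) : Prop := out = dp_alt left right n heights cache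
instance (left : Int) (right : Int) (n : Int) (heights : List Int) (cache : List (Int × Int × Int)) (out : Int) : Decidable (Spec_dp left right n heights cache out) := by unfold Spec_dp; infer_instance

-- ===== CLAIM (what is proved, stated in full; the proofs are below) =====
def Claim_equal_dp : Prop := ∀ (left : Int) (right : Int) (n : Int) (heights : List Int) (cache : List (Int × Int × Int)), Dom_dp left right n heights cache → Pre_dp left right n heights cache → Spec_dp left right n heights cache (dp left right n heights cache)

-- ===== LEMMAS AND PROOFS =====

-- "all of heights[l+1..r] are < heights[l]" as a Bool
def ASb (heights : List Int) (l r : Int) : Bool :=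
  (PySem.List.pyRange (l + 1) (r + 1) 1).all
    (fun p => decide ((PySem.List.pyGet? heights p).getD 0 < (PySem.List.pyGet? heights l).getD 0))

-- pure recurrence both ports compute (lookups in the ORIGINAL cache)
def F (heights : List Int) (cache : List (Int × Int × Int)) (l r : Int) : Int :=
  if r ≤ l then 1
  else if ASb heights l r then r - l + 1
  else
    match dpCacheGetA cache l r with
    | some v => v
    | none => max (max (F heights cache (l + 1) r) (F heights cache (l + 1) (r - 1)))
                  (F heights cache l (r - 1))
termination_by (r - l).toNat
decreasing_by all_goals omega

theorem allA_eq (heights : List Int) (hl : Int) (ps : List Int) :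
    dpAllSmallerA heights hl ps = ps.all (fun p => decide ((PySem.List.pyGet? heights p).getD 0 < hl)) := by
  induction ps with
  | nil => rfl
  | cons p ps ih =>
      simp only [dpAllSmallerA, List.all_cons, ih]
      by_cases h : hl ≤ (PySem.List.pyGet? heights p).getD 0
      · simp [h, not_lt.mpr h]
      · simp [h, lt_of_not_ge h]

theorem ASb_base (heights : List Int) (l r : Int) (h : r ≤ l) : ASb heights l r = true := by
  simp [ASb, PySem.List.pyRange_one_eq_nil (by omega : r + 1 ≤ l + 1)]

theorem ASb_succ (heights : List Int) (l r : Int) (h : l < r) :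
    ASb heights l r = (ASb heights l (r - 1)
      && decide ((PySem.List.pyGet? heights r).getD 0 < (PySem.List.pyGet? heights l).getD 0)) := by
  unfold ASb
  have h2 : r - 1 + 1 = r := by omega
  rw [h2, PySem.List.pyRange_one_succ_right (by omega : l + 1 ≤ r), List.all_append]
  simp

theorem cacheGetA_append (c e : List (Int × Int × Int)) (l r : Int) :
    dpCacheGetA (c ++ e) l r = (dpCacheGetA c l r).or (dpCacheGetA e l r) := by
  induction c with
  | nil => rfl
  | cons x t ih =>
      obtain ⟨a, b, v⟩ := x
      by_cases h : a = l ∧ b = r <;> simp [dpCacheGetA, h, ih]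

theorem cacheGetA_mem (e : List (Int × Int × Int)) (l r v : Int)
    (h : dpCacheGetA e l r = some v) : (l, r, v) ∈ e := by
  induction e with
  | nil => simp [dpCacheGetA] at h
  | cons x t ih =>
      obtain ⟨a, b, w⟩ := x
      by_cases hk : a = l ∧ b = r
      · simp [dpCacheGetA, hk] at h
        simp [hk.1, hk.2, h]
      · simp [dpCacheGetA, hk] at h
        exact List.mem_cons_of_mem _ (ih h)

theorem findB_eq (cache : List (Int × Int × Int)) (l r : Int) :
    dpCacheFindB cache (l, r) = dpCacheGetA cache l r := by
  induction cache with
  | nil => rfl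
  | cons x t ih =>
      obtain ⟨a, b, v⟩ := x
      by_cases h : a = l ∧ b = r
      · simp [dpCacheFindB, dpCacheGetA, List.find?, h.1, h.2]
      · have : ¬ (a == l && b == r) = true := by
          simp only [Bool.and_eq_true, beq_iff_eq]; exact h
        simp only [dpCacheFindB, List.find?, dpCacheGetA] at *
        simp only [this, if_neg h]
        exact ih

-- the evolving cache is the original plus entries that already carry their F-value
def GoodExt (heights : List Int) (cache c' : List (Int × Int × Int)) : Prop :=
  ∃ e, c' = cache ++ e ∧ ∀ x ∈ e, x.2.2 = F heights cache x.1 x.2.1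

theorem dpGoA_eq (n : Int) (heights : List Int) (cache : List (Int × Int × Int)) :
    ∀ k (l r : Int) (c' : List (Int × Int × Int)), (r - l).toNat < k →
      GoodExt heights cache c' →
      (dpGoA k n heights l r c').1 = F heights cache l r ∧
      GoodExt heights cache (dpGoA k n heights l r c').2 := by
  intro k
  induction k with
  | zero =>
      intro l r c' hk hg
      exact absurd hk (by omega)
  | succ k ih =>
      intro l r c' hk hg
      by_cases hrl : r ≤ l
      · rw [dpGoA, if_pos hrl]
        exact ⟨by rw [F, if_pos hrl], hg⟩
      · have hAS : dpAllSmallerA heights ((PySem.List.pyGet? heights l).getD 0)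
            (PySem.List.pyRange (l + 1) (r + 1) 1) = ASb heights l r := by
          rw [allA_eq]; rfl
        obtain ⟨e, rfl, he⟩ := hg
        by_cases hsm : ASb heights l r = true
        · rw [dpGoA, if_neg hrl, hAS, if_pos hsm]
          exact ⟨by rw [F, if_neg hrl, if_pos hsm], ⟨e, rfl, he⟩⟩
        · rcases hlk : dpCacheGetA (cache ++ e) l r with _ | v
          · -- not cached: recurse
            have hlk' := hlk
            rw [cacheGetA_append] at hlk'
            have hc : dpCacheGetA cache l r = none := by
              cases h1 : dpCacheGetA cache l r <;> simp [h1] at hlk' ⊢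
            rw [dpGoA, if_neg hrl, hAS, if_neg hsm, hlk]
            dsimp only
            obtain ⟨h1, hg1⟩ := ih (l + 1) r (cache ++ e) (by omega) ⟨e, rfl, he⟩
            obtain ⟨e1, he1eq, he1⟩ := hg1
            obtain ⟨h2, hg2⟩ := ih (l + 1) (r - 1) _ (by omega) ⟨e1, he1eq, he1⟩
            obtain ⟨e2, he2eq, he2⟩ := hg2
            obtain ⟨h3, hg3⟩ := ih l (r - 1) _ (by omega) ⟨e2, he2eq, he2⟩
            obtain ⟨e3, he3eq, he3⟩ := hg3
            have hret : max (max (dpGoA k n heights (l + 1) r (cache ++ e)).1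
                (dpGoA k n heights (l + 1) (r - 1) (dpGoA k n heights (l + 1) r (cache ++ e)).2).1)
                (dpGoA k n heights l (r - 1) (dpGoA k n heights (l + 1) (r - 1)
                  (dpGoA k n heights (l + 1) r (cache ++ e)).2).2).1 = F heights cache l r := by
              have hFeq : F heights cache l r =
                  max (max (F heights cache (l + 1) r) (F heights cache (l + 1) (r - 1)))
                    (F heights cache l (r - 1)) := by
                conv_lhs => rw [F]
                rw [if_neg hrl, if_neg hsm, hc]
              rw [h1, h2, h3, hFeq]
            refine ⟨hret, ?_⟩
            refine ⟨e3 ++ [(l, r, F heights cache l r)], ?_, ?_⟩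
            · rw [he3eq, hret, List.append_assoc]
            · intro x hx
              rcases List.mem_append.mp hx with hx | hx
              · exact he3 x hx
              · simp at hx; subst hx; rfl
          · -- cache hit (original entry or a recorded F-value)
            rw [dpGoA, if_neg hrl, hAS, if_neg hsm, hlk]
            refine ⟨?_, ⟨e, rfl, he⟩⟩
            rw [cacheGetA_append] at hlk
            rcases h1 : dpCacheGetA cache l r with _ | w
            · rw [h1] at hlk; simp at hlk
              have := he _ (cacheGetA_mem e l r v hlk)
              exact this
            · rw [h1] at hlk; simp at hlk; subst hlk
              rw [F, if_neg hrl, if_neg hsm, h1]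

-- ===== B-side invariants =====

def ValInv (heights : List Int) (cache : List (Int × Int × Int))
    (val : PySem.Dict (Int × Int) Int) : Prop :=
  ∀ a b v, val.get? (a, b) = some v → v = F heights cache a b

def SmInv (heights : List Int) (sm : PySem.Dict (Int × Int) Bool) : Prop :=
  ∀ a b s, sm.get? (a, b) = some s → s = ASb heights a b

-- presence of all cells strictly before position (d, l) in fill order
def Pres (left right d l : Int) (keys : List (Int × Int)) : Prop :=
  ∀ a b : Int, left ≤ a → a < b → b ≤ right → (b - a < d ∨ (b - a = d ∧ a < l)) →
    (a, b) ∈ keys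

theorem cellB_step (heights : List Int) (cache : List (Int × Int × Int))
    (left right d l : Int) (st : PySem.Dict (Int × Int) Int × PySem.Dict (Int × Int) Bool)
    (hd : 1 ≤ d) (hl : left ≤ l) (hr : l + d ≤ right)
    (hv : ValInv heights cache st.1) (hs : SmInv heights st.2)
    (hpv : Pres left right d l st.1.keys) (hps : Pres left right d l st.2.keys) :
    ValInv heights cache (dpCellB heights cache st d l).1 ∧
    SmInv heights (dpCellB heights cache st d l).2 ∧
    Pres left right d (l + 1) (dpCellB heights cache st d l).1.keys ∧
    Pres left right d (l + 1) (dpCellB heights cache st d l).2.keys := by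
  have hget : ∀ a b : Int, left ≤ a → b ≤ right → b - a < d →
      st.1.getD (a, b) 1 = F heights cache a b := by
    intro a b ha hb hw
    rcases hq : st.1.get? (a, b) with _ | u
    · rw [PySem.Dict.getD_eq_get?_getD, hq]
      by_cases hab : a < b
      · exact absurd (hpv a b ha hab hb (Or.inl hw))
          ((PySem.Dict.get?_eq_none_iff_not_mem_keys _ _).mp hq)
      · rw [F, if_pos (by omega : b ≤ a)]; rfl
    · rw [PySem.Dict.getD_eq_get?_getD, hq]
      exact hv a b u hq
  have hsm_eq : ((d == 1 || st.2.getD (l, l + d - 1) false)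
      && decide ((PySem.List.pyGet? heights (l + d)).getD 0 < (PySem.List.pyGet? heights l).getD 0))
      = ASb heights l (l + d) := by
    rw [ASb_succ heights l (l + d) (by omega)]
    have harith : l + d - 1 = l + (d - 1) := by ring
    by_cases hd1 : d = 1
    · subst hd1
      rw [ASb_base heights l (l + 1 - 1) (by omega)]
      simp
    · have hne : (d == 1) = false := by simp [hd1]
      rw [hne, Bool.false_or]
      have hmem := hps l (l + d - 1) hl (by omega) (by omega) (Or.inl (by omega))
      rcases hq : st.2.get? (l, l + d - 1) with _ | s
      · exact absurd hmem ((PySem.Dict.get?_eq_none_iff_not_mem_keys _ _).mp hq)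
      · have hgd : st.2.getD (l, l + d - 1) false = s := by
          rw [PySem.Dict.getD_eq_get?_getD, hq]
          rfl
        rw [hgd, hs _ _ _ hq]
  have hv_eq : (if ((d == 1 || st.2.getD (l, l + d - 1) false)
      && decide ((PySem.List.pyGet? heights (l + d)).getD 0 < (PySem.List.pyGet? heights l).getD 0)) then d + 1
    else match dpCacheFindB cache (l, l + d) with
      | some w => w
      | none => max (max (st.1.getD (l + 1, l + d) 1) (st.1.getD (l + 1, l + d - 1) 1))
                    (st.1.getD (l, l + d - 1) 1)) = F heights cache l (l + d) := by
    rw [hsm_eq, findB_eq]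
    by_cases hsm2 : ASb heights l (l + d) = true
    · rw [if_pos hsm2]
      conv_rhs => rw [F]
      rw [if_neg (by omega : ¬ l + d ≤ l), if_pos hsm2]
      omega
    · rw [if_neg hsm2]
      conv_rhs => rw [F]
      rw [if_neg (by omega : ¬ l + d ≤ l), if_neg hsm2]
      rcases hck : dpCacheGetA cache l (l + d) with _ | w
      · rw [hget (l + 1) (l + d) (by omega) (by omega) (by omega),
          hget (l + 1) (l + d - 1) (by omega) (by omega) (by omega),
          hget l (l + d - 1) hl (by omega) (by omega)]
      · rfl
  have hcell : dpCellB heights cache st d l =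
      (st.1.insert (l, l + d) (F heights cache l (l + d)),
       st.2.insert (l, l + d) (ASb heights l (l + d))) := by
    unfold dpCellB
    dsimp only
    rw [hv_eq, hsm_eq]
  rw [hcell]
  refine ⟨?_, ?_, ?_, ?_⟩
  · intro a b u hq
    rw [PySem.Dict.get?_insert] at hq
    split_ifs at hq with hk
    · cases hq; rw [(Prod.mk.injEq .. ).mp hk |>.1, (Prod.mk.injEq ..).mp hk |>.2]
    · exact hv a b u hq
  · intro a b u hq
    rw [PySem.Dict.get?_insert] at hq
    split_ifs at hq with hk
    · cases hq; rw [(Prod.mk.injEq .. ).mp hk |>.1, (Prod.mk.injEq ..).mp hk |>.2]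
    · exact hs a b u hq
  · intro a b ha hab hb hcond
    rw [PySem.Dict.mem_keys_insert]
    by_cases hk : a = l ∧ b = l + d
    · exact Or.inl (by rw [hk.1, hk.2])
    · refine Or.inr (hpv a b ha hab hb ?_)
      rcases hcond with h | ⟨h1, h2⟩
      · exact Or.inl h
      · refine Or.inr ⟨h1, ?_⟩
        rcases lt_or_eq_of_le (by omega : a ≤ l) with h3 | h3
        · exact h3
        · exact absurd ⟨h3, by omega⟩ hk
  · intro a b ha hab hb hcond
    rw [PySem.Dict.mem_keys_insert]
    by_cases hk : a = l ∧ b = l + d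
    · exact Or.inl (by rw [hk.1, hk.2])
    · refine Or.inr (hps a b ha hab hb ?_)
      rcases hcond with h | ⟨h1, h2⟩
      · exact Or.inl h
      · refine Or.inr ⟨h1, ?_⟩
        rcases lt_or_eq_of_le (by omega : a ≤ l) with h3 | h3
        · exact h3
        · exact absurd ⟨h3, by omega⟩ hk

theorem innerB (heights : List Int) (cache : List (Int × Int × Int))
    (left right d : Int) (hd : 1 ≤ d) :
    ∀ (l : Int) (st : PySem.Dict (Int × Int) Int × PySem.Dict (Int × Int) Bool),
      left ≤ l →
      ValInv heights cache st.1 → SmInv heights st.2 →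
      Pres left right d l st.1.keys → Pres left right d l st.2.keys →
      (let st' := (PySem.List.pyRange l (right - d + 1) 1).foldl
          (fun st l => dpCellB heights cache st d l) st
       ValInv heights cache st'.1 ∧ SmInv heights st'.2 ∧
       Pres left right (d + 1) left st'.1.keys ∧ Pres left right (d + 1) left st'.2.keys) := by
  suffices h : ∀ (k : Nat) (l : Int) (st : PySem.Dict (Int × Int) Int × PySem.Dict (Int × Int) Bool),
      (right - d + 1 - l).toNat ≤ k → left ≤ l →
      ValInv heights cache st.1 → SmInv heights st.2 →
      Pres left right d l st.1.keys → Pres left right d l st.2.keys →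
      (let st' := (PySem.List.pyRange l (right - d + 1) 1).foldl
          (fun st l => dpCellB heights cache st d l) st
       ValInv heights cache st'.1 ∧ SmInv heights st'.2 ∧
       Pres left right (d + 1) left st'.1.keys ∧ Pres left right (d + 1) left st'.2.keys) by
    intro l st hll hv hs hpv hps
    exact h (right - d + 1 - l).toNat l st le_rfl hll hv hs hpv hps
  intro k
  induction k with
  | zero =>
      intro l st hk hll hv hs hpv hps
      have hstop : right - d + 1 ≤ l := by omega
      rw [PySem.List.pyRange_one_eq_nil hstop]
      refine ⟨hv, hs, ?_, ?_⟩
      · intro a b ha hab hb hcond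
        exact hpv a b ha hab hb (by omega)
      · intro a b ha hab hb hcond
        exact hps a b ha hab hb (by omega)
  | succ k ih =>
      intro l st hk hll hv hs hpv hps
      by_cases hstop : right - d + 1 ≤ l
      · rw [PySem.List.pyRange_one_eq_nil hstop]
        refine ⟨hv, hs, ?_, ?_⟩
        · intro a b ha hab hb hcond
          exact hpv a b ha hab hb (by omega)
        · intro a b ha hab hb hcond
          exact hps a b ha hab hb (by omega)
      · rw [PySem.List.pyRange_one_cons (by omega : l < right - d + 1), List.foldl_cons]
        obtain ⟨hv', hs', hpv', hps'⟩ :=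
          cellB_step heights cache left right d l st hd hll (by omega) hv hs hpv hps
        exact ih (l + 1) _ (by omega) (by omega) hv' hs' hpv' hps'

theorem outerB (heights : List Int) (cache : List (Int × Int × Int)) (left right : Int) :
    ∀ (d : Int) (st : PySem.Dict (Int × Int) Int × PySem.Dict (Int × Int) Bool),
      1 ≤ d →
      ValInv heights cache st.1 → SmInv heights st.2 →
      Pres left right d left st.1.keys → Pres left right d left st.2.keys →
      (let st' := (PySem.List.pyRange d (right - left + 1) 1).foldl
          (fun st d => (PySem.List.pyRange left (right - d + 1) 1).foldl
            (fun st l => dpCellB heights cache st d l) st) st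
       ValInv heights cache st'.1 ∧
       Pres left right (right - left + 1) left st'.1.keys) := by
  suffices h : ∀ (k : Nat) (d : Int) (st : PySem.Dict (Int × Int) Int × PySem.Dict (Int × Int) Bool),
      (right - left + 1 - d).toNat ≤ k → 1 ≤ d →
      ValInv heights cache st.1 → SmInv heights st.2 →
      Pres left right d left st.1.keys → Pres left right d left st.2.keys →
      (let st' := (PySem.List.pyRange d (right - left + 1) 1).foldl
          (fun st d => (PySem.List.pyRange left (right - d + 1) 1).foldl
            (fun st l => dpCellB heights cache st d l) st) st
       ValInv heights cache st'.1 ∧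
       Pres left right (right - left + 1) left st'.1.keys) by
    intro d st hd hv hs hpv hps
    exact h (right - left + 1 - d).toNat d st le_rfl hd hv hs hpv hps
  intro k
  induction k with
  | zero =>
      intro d st hk hd hv hs hpv hps
      have hstop : right - left + 1 ≤ d := by omega
      rw [PySem.List.pyRange_one_eq_nil hstop]
      refine ⟨hv, ?_⟩
      intro a b ha hab hb hcond
      exact hpv a b ha hab hb (by omega)
  | succ k ih =>
      intro d st hk hd hv hs hpv hps
      by_cases hstop : right - left + 1 ≤ d
      · rw [PySem.List.pyRange_one_eq_nil hstop]
        refine ⟨hv, ?_⟩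
        intro a b ha hab hb hcond
        exact hpv a b ha hab hb (by omega)
      · rw [PySem.List.pyRange_one_cons (by omega : d < right - left + 1), List.foldl_cons]
        obtain ⟨hv', hs', hpv', hps'⟩ := innerB heights cache left right d hd left st le_rfl hv hs hpv hps
        exact ih (d + 1) _ (by omega) (by omega) hv' hs' hpv' hps'

theorem dp_alt_eq_F (left right n : Int) (heights : List Int)
    (cache : List (Int × Int × Int)) :
    dp_alt left right n heights cache = F heights cache left right := by
  unfold dp_alt
  by_cases hrl : right ≤ left
  · rw [if_pos hrl, F, if_pos hrl]
  · rw [if_neg hrl]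
    dsimp only
    have hempty : ∀ a b : Int, left ≤ a → a < b → b ≤ right → (b - a < 1 ∨ (b - a = 1 ∧ a < left)) → False := by
      intro a b ha hab hb hcond
      omega
    obtain ⟨hv', hp'⟩ := outerB heights cache left right 1
      (PySem.Dict.empty, PySem.Dict.empty) le_rfl
      (by intro a b v hq; rw [PySem.Dict.get?_empty] at hq; cases hq)
      (by intro a b v hq; rw [PySem.Dict.get?_empty] at hq; cases hq)
      (by intro a b ha hab hb hcond; exact absurd hcond (by omega))
      (by intro a b ha hab hb hcond; exact absurd hcond (by omega))
    have hmem := hp' left right le_rfl (by omega) le_rfl (Or.inl (by omega))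
    rcases hq : ((PySem.List.pyRange 1 (right - left + 1) 1).foldl
        (fun st d => (PySem.List.pyRange left (right - d + 1) 1).foldl
          (fun st l => dpCellB heights cache st d l) st)
        (PySem.Dict.empty, PySem.Dict.empty)).1.get? (left, right) with _ | v
    · exact absurd hmem ((PySem.Dict.get?_eq_none_iff_not_mem_keys _ _).mp hq)
    · rw [Option.getD_some, hv' left right v hq]

theorem dp_eq_F (left right n : Int) (heights : List Int) (cache : List (Int × Int × Int)) :
    dp left right n heights cache = F heights cache left right := by
  have h := dpGoA_eq n heights cache ((right - left).toNat + 1) left right cache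
    (by omega) ⟨[], by simp, by simp⟩
  exact h.1

-- ===== VERDICT (by name: the statement is the Claim_ definition above) =====
theorem dp_spec : Claim_equal_dp := by
  intro left right n heights cache _ _
  unfold Spec_dp
  rw [dp_eq_F, dp_alt_eq_F]
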